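-- pv_equiv track=rewrite | github.com/cNille/AdventOfCode | 2019/16.py | transformer_2
-- ===== SOURCE A (Python) =====
-- def transformer_2(signal, iterations):
--     for _ in range(iterations):
--         arr = []
--         summing = sum(signal)
--         arr.append(abs(summing % 10))
--
--         for s in signal:
--             summing -= s
--             arr.append(abs(summing % 10))
--         signal = arr
--     return signal
-- ===== SOURCE B (Python) =====
-- def transformer_2(sig, iterations):
--     for _ in range(iterations):
--         suffix = [0]
--         for s in reversed(sig):
--             suffix.append(suffix[-1] + s)
--         suffix.reverse()
--         sig = [x % 10 for x in suffix]
--     return sig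
-- ===== Notes on version B (the rewrite author's own statement) =====
-- stated objective: alternative
-- what changed: Each pass is done in two staged sweeps: first build the raw (un-modded) suffix sums by extending a list from its own last element over the reversed signal and reversing it, then a separate comprehension takes each raw sum mod 10; A instead fuses everything into one forward pass that precomputes sum(signal), subtracts element by element and applies abs(%10) immediately.
import Mathlib
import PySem

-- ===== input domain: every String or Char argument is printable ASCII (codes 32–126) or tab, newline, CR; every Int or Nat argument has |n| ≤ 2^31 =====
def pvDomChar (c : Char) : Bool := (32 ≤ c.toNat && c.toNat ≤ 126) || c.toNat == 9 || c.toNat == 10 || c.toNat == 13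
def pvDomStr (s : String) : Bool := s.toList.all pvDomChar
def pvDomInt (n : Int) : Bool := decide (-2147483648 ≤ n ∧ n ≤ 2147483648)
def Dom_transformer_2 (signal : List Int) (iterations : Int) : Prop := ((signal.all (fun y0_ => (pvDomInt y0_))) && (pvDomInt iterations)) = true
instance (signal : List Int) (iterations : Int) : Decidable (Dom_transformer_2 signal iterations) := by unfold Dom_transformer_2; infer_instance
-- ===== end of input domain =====

-- B does each pass in two staged sweeps (build raw suffix sums by extending from the list's last
-- element over the reversed signal, then a separate mod-10 map) instead of A's single fused forward
-- pass with a precomputed total and element-by-element subtraction; same cost, alternative decomposition.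

-- ===== PORT A =====
-- for _ in range(iterations): summing = sum(signal); arr = [abs(summing % 10)];
--   for s in signal: summing -= s; arr.append(abs(summing % 10)); signal = arr
def transformer_2 (signal : List Int) (iterations : Int) : List Int :=
  (List.range iterations.toNat).foldl
    (fun sig _ =>
      let summing := sig.sum
      (sig.foldl
        (fun (st : Int × List Int) s =>
          (st.1 - s, st.2 ++ [|PySem.Int.mod (st.1 - s) 10|]))
        (summing, [|PySem.Int.mod summing 10|])).2)
    signal

-- ===== PORT B =====
-- for _ in range(iterations): suffix = [0];
--   for s in reversed(signal): suffix.append(suffix[-1] + s)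
--   suffix.reverse(); signal = [x % 10 for x in suffix]
def transformer_2_alt (signal : List Int) (iterations : Int) : List Int :=
  (List.range iterations.toNat).foldl
    (fun sig _ =>
      let suffix := sig.reverse.foldl (fun acc s => acc ++ [acc.getLastD 0 + s]) [0]
      suffix.reverse.map (fun x => PySem.Int.mod x 10))
    signal

-- ===== PRECONDITION & SPEC =====
def Spec_transformer_2 (signal : List Int) (iterations : Int) (out : List Int) : Prop := out = transformer_2_alt signal iterations
instance (signal : List Int) (iterations : Int) (out : List Int) : Decidable (Spec_transformer_2 signal iterations out) := by unfold Spec_transformer_2; infer_instance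

-- ===== CLAIM (what is proved, stated in full; the proofs are below) =====
def Claim_equal_transformer_2 : Prop := ∀ (signal : List Int) (iterations : Int), Dom_transformer_2 signal iterations → Spec_transformer_2 signal iterations (transformer_2 signal iterations)

-- ===== LEMMAS AND PROOFS =====

-- every list is the head of its own tails
lemma tails_head (l : List Int) : l.tails = l :: l.tails.tail := by
  cases l <;> simp

-- characterisation of A's inner pass: appended entries are the suffix sums (shifted by c - l.sum), mod 10
lemma foldA_char (l : List Int) (c : Int) (arr : List Int) :
    (l.foldl (fun (st : Int × List Int) s =>
        (st.1 - s, st.2 ++ [|PySem.Int.mod (st.1 - s) 10|])) (c, arr)).2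
      = arr ++ l.tails.tail.map (fun t => |PySem.Int.mod (c - l.sum + t.sum) 10|) := by
  induction l generalizing c arr with
  | nil => simp
  | cons s rest ih =>
      simp only [List.foldl_cons, ih, List.tails_cons, List.tail_cons]
      rw [tails_head rest]
      simp only [List.map_cons, List.sum_cons, List.tail_cons, List.append_assoc,
        List.cons_append, List.nil_append]
      have h1 : c - (s + rest.sum) + rest.sum = c - s := by ring
      have h2 : (fun t : List Int => |PySem.Int.mod (c - s - rest.sum + t.sum) 10|)
          = fun t : List Int => |PySem.Int.mod (c - (s + rest.sum) + t.sum) 10| := by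
        funext t; ring_nf
      rw [h1, h2]

-- B's first sweep is a scanl: extending a list from its own last element accumulates running sums
lemma foldB_scanl (l : List Int) (c : Int) (acc : List Int) :
    l.foldl (fun a s => a ++ [a.getLastD 0 + s]) (acc ++ [c])
      = acc ++ l.scanl (· + ·) c := by
  induction l generalizing c acc with
  | nil => simp
  | cons s rest ih =>
      simp only [List.foldl_cons, List.scanl_cons]
      rw [List.getLastD_concat, ih (c + s) (acc ++ [c])]
      simp

-- the scanl of (+) from c lists c plus the prefix sums
lemma scanl_inits (l : List Int) (c : Int) :
    l.scanl (· + ·) c = l.inits.map (fun p => c + p.sum) := by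
  induction l generalizing c with
  | nil => simp
  | cons s rest ih =>
      simp only [List.scanl_cons, List.inits_cons, List.map_cons, List.map_map, ih]
      congr 1
      · simp
      · apply List.map_congr_left; intro p _; simp; ring

-- the two pass bodies agree
lemma step_eq (sig : List Int) :
    (sig.foldl (fun (st : Int × List Int) s =>
        (st.1 - s, st.2 ++ [|PySem.Int.mod (st.1 - s) 10|]))
      (sig.sum, [|PySem.Int.mod sig.sum 10|])).2
    = (sig.reverse.foldl (fun a s => a ++ [a.getLastD 0 + s]) [0]).reverse.map
        (fun x => PySem.Int.mod x 10) := by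
  have h0 : ([0] : List Int) = [] ++ [0] := by simp
  rw [foldA_char, h0, foldB_scanl, scanl_inits]
  have habs : ∀ x : Int, |PySem.Int.mod x 10| = PySem.Int.mod x 10 := fun x =>
    abs_of_nonneg (PySem.Int.mod_nonneg x (by norm_num))
  simp only [habs, sub_self, zero_add, List.nil_append]
  rw [List.inits_reverse]
  simp only [List.map_reverse, List.reverse_reverse, List.map_map]
  rw [tails_head sig]
  simp [Function.comp_def, List.sum_reverse]

-- ===== VERDICT (by name: the statement is the Claim_ definition above) =====
theorem transformer_2_spec : Claim_equal_transformer_2 := by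
  intro signal iterations _
  unfold Spec_transformer_2 transformer_2 transformer_2_alt
  simp only [step_eq]
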